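-- pv_equiv track=rewrite | github.com/michaeldtimpe/luxe | luxebox/luxe/agents/base.py | _preview_args
-- ===== SOURCE A (Python) =====
-- from typing import Any, Callable
--
-- def _preview_args(args: dict[str, Any]) -> str:
--     """Compact, human-scannable render of a tool's arguments for live tail.
--     Keeps the two most informative keys (path-like + pattern-like first)
--     and truncates each value to 40 chars. Never blocks on large payloads."""
--     if not args:
--         return ""
--     priority = ("path", "file", "pattern", "query", "url", "cmd", "command", "name")
--     items: list[tuple[str, Any]] = []
--     seen: set[str] = set()
--     for k in priority:
--         if k in args and k not in seen:
--             items.append((k, args[k]))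
--             seen.add(k)
--     for k, v in args.items():
--         if k in seen:
--             continue
--         items.append((k, v))
--         seen.add(k)
--         if len(items) >= 2:
--             break
--     parts: list[str] = []
--     for k, v in items[:2]:
--         s = str(v).replace("\n", " ")
--         if len(s) > 40:
--             s = s[:37] + "…"
--         parts.append(f"{k}={s}")
--     return " ".join(parts)
-- ===== SOURCE B (Python) =====
-- def _preview_args(args):
--     """Compact render of tool arguments: stable-sort all items by priority
--     rank, keep the first two, truncate each value to 40 chars."""
--     if not args:
--         return ""
--     priority = ("path", "file", "pattern", "query", "url", "cmd", "command", "name")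
--
--     def rank(kv):
--         k = kv[0]
--         return priority.index(k) if k in priority else len(priority)
--
--     def render(kv):
--         k, v = kv
--         s = str(v).replace("\n", " ")
--         if len(s) > 40:
--             s = s[:37] + "…"
--         return f"{k}={s}"
--
--     return " ".join(render(kv) for kv in sorted(args.items(), key=rank)[:2])
-- ===== Notes on version B (the rewrite author's own statement) =====
-- stated objective: alternative
-- what changed: Replaces A's two selection loops with a seen-set (priority scan, then dict-order fill with an early break) by a single stable sort of all items under a computed priority rank, taking the first two of the sorted list.
import Mathlib
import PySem

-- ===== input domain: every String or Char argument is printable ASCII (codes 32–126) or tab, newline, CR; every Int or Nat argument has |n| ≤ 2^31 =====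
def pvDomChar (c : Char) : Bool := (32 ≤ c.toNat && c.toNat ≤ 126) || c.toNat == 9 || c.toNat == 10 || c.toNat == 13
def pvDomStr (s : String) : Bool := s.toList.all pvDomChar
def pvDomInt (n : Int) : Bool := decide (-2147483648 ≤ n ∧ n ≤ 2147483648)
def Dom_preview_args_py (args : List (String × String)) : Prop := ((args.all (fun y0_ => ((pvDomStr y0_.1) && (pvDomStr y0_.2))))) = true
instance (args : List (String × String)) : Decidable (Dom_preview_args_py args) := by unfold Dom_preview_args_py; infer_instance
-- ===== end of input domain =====

-- B renders the same two keys via one stable sort on a priority rank instead of A's two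
-- selection loops over a seen-set (objective: alternative decomposition, same return value).

-- ===== PORT A =====
def pvPriorityA : List String := ["path", "file", "pattern", "query", "url", "cmd", "command", "name"]

-- s = str(v).replace("\n", " "); truncate to 37 chars + "…" when len > 40; "k=s"
def pvRenderA (kv : String × String) : String :=
  let s := PySem.Str.replace kv.2 "\n" " "
  let s := if 40 < PySem.Str.len s then PySem.Str.slice s none (some 37) ++ "…" else s
  kv.1 ++ "=" ++ s

-- A's second loop ('for k, v in args.items(): …'), with its early break at two items
def pvFillA : List (String × String) → List (String × String) → PySem.Set String → List (String × String)
  | [], items, _ => items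
  | (k, v) :: rest, items, seen =>
    if PySem.Set.contains seen k then pvFillA rest items seen
    else
      let items' := items ++ [(k, v)]
      if 2 ≤ items'.length then items'
      else pvFillA rest items' (PySem.Set.add seen k)

def preview_args_py (args : List (String × String)) : String :=
  if args = [] then ""
  else
    let d := PySem.Dict.mk args
    let st := pvPriorityA.foldl
      (fun (p : List (String × String) × PySem.Set String) k =>
        if PySem.Dict.contains d k && !(PySem.Set.contains p.2 k) then
          (p.1 ++ [(k, PySem.Dict.getD d k "")], PySem.Set.add p.2 k)
        else p)
      ([], PySem.Set.empty)
    let items := pvFillA args st.1 st.2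
    PySem.Str.join " " ((items.take 2).map pvRenderA)

-- ===== PORT B =====
def pvPriorityB : List String := ["path", "file", "pattern", "query", "url", "cmd", "command", "name"]

-- rank(kv) = priority.index(k) if k in priority else len(priority)
def pvRank (kv : String × String) : Nat :=
  if pvPriorityB.contains kv.1 then (PySem.List.index? pvPriorityB kv.1).getD pvPriorityB.length
  else pvPriorityB.length

def pvRenderB (kv : String × String) : String :=
  let s := PySem.Str.replace kv.2 "\n" " "
  let s := if 40 < PySem.Str.len s then PySem.Str.slice s none (some 37) ++ "…" else s
  kv.1 ++ "=" ++ s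

def preview_args_py_alt (args : List (String × String)) : String :=
  if args = [] then ""
  else PySem.Str.join " " (((PySem.List.sorted args pvRank).take 2).map pvRenderB)

-- ===== PRECONDITION & SPEC =====
-- Pre_ excludes association lists with a duplicated key: they do not represent any Python
-- dict (A's parameter type 'dict[str, Any]'), so they encode no input of A at all.
def Pre_preview_args_py (args : List (String × String)) : Prop := (args.map Prod.fst).Nodup
instance (args : List (String × String)) : Decidable (Pre_preview_args_py args) := by unfold Pre_preview_args_py; infer_instance
def pvWitness_preview_args_py : (List (String × String)) := [("path", "/tmp/a.txt"), ("x", "1")]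
def Spec_preview_args_py (args : List (String × String)) (out : String) : Prop := out = preview_args_py_alt args
instance (args : List (String × String)) (out : String) : Decidable (Spec_preview_args_py args out) := by unfold Spec_preview_args_py; infer_instance

-- ===== CLAIM (what is proved, stated in full; the proofs are below) =====
def Claim_equal_preview_args_py : Prop := ∀ (args : List (String × String)), Dom_preview_args_py args → Pre_preview_args_py args → Spec_preview_args_py args (preview_args_py args)

-- ===== LEMMAS AND PROOFS =====

-- insertBy walks past a prefix it never goes before
theorem pv_insertBy_append {α : Type} (before : α → α → Bool) (x : α) (A B : List α)
    (h : ∀ a ∈ A, before x a = false) :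
    PySem.List.insertBy before x (A ++ B) = A ++ PySem.List.insertBy before x B := by
  induction A with
  | nil => simp
  | cons a A ih =>
    have ha : before x a = false := h a (by simp)
    simp only [List.cons_append, PySem.List.insertBy, ha]
    simp [ih (fun a ha' => h a (by simp [ha']))]

-- insertBy lands at the head of a block it goes before entirely
theorem pv_insertBy_head {α : Type} (before : α → α → Bool) (x : α) (B : List α)
    (h : ∀ b ∈ B, before x b = true) :
    PySem.List.insertBy before x B = x :: B := by
  cases B with
  | nil => rfl
  | cons b B => simp [PySem.List.insertBy, h b (by simp)]

theorem pv_flatMap_congr {α β : Type} (l : List α) (f g : α → List β)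
    (h : ∀ a ∈ l, f a = g a) : l.flatMap f = l.flatMap g := by
  simp only [List.flatMap_def]
  rw [List.map_congr_left h]

-- the stable sort by a bounded Nat key is the concatenation of its rank classes, in rank order
theorem pv_sorted_flatMap {α : Type} (xs : List α) (key : α → Nat) (N : Nat)
    (h : ∀ x ∈ xs, key x ≤ N) :
    PySem.List.sorted xs key = (List.range (N + 1)).flatMap (fun r => xs.filter (fun x => key x == r)) := by
  rw [PySem.List.sorted_eq_foldl_insertBy]
  induction xs using List.reverseRecOn with
  | nil => simp
  | append_singleton xs x ih =>
    rw [List.foldl_append, List.foldl_cons, List.foldl_nil,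
      ih (fun y hy => h y (by simp [hy]))]
    have hx : key x ≤ N := h x (by simp)
    have hsplit : N + 1 = (key x + 1) + (N - key x) := by omega
    rw [hsplit, List.range_add, List.flatMap_append, List.flatMap_append]
    have hA : ∀ a ∈ (List.range (key x + 1)).flatMap (fun r => xs.filter (fun y => key y == r)),
        decide (key x < key a) = false := by
      intro a ha
      simp only [List.mem_flatMap, List.mem_range, List.mem_filter, beq_iff_eq] at ha
      obtain ⟨r, hr, _, hkey⟩ := ha
      simp [hkey]; omega
    rw [pv_insertBy_append _ _ _ _ hA]
    have hB : PySem.List.insertBy (fun a b => decide (key a < key b)) x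
        (((List.range (N - key x)).map (fun r => key x + 1 + r)).flatMap (fun r => xs.filter (fun y => key y == r)))
        = x :: ((List.range (N - key x)).map (fun r => key x + 1 + r)).flatMap (fun r => xs.filter (fun y => key y == r)) := by
      apply pv_insertBy_head
      intro b hb
      simp only [List.mem_flatMap, List.mem_map, List.mem_range, List.mem_filter, beq_iff_eq] at hb
      obtain ⟨r, ⟨j, hj, hr⟩, _, hkey⟩ := hb
      simp [hkey]; omega
    rw [hB]
    have h1 : (List.range (key x + 1)).flatMap (fun r => (xs ++ [x]).filter (fun y => key y == r))
        = (List.range (key x + 1)).flatMap (fun r => xs.filter (fun y => key y == r)) ++ [x] := by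
      rw [List.range_succ, List.flatMap_append, List.flatMap_append]
      rw [pv_flatMap_congr (List.range (key x)) _ (fun r => xs.filter (fun y => key y == r))
        (by intro r hr
            rw [List.filter_append]
            simp only [List.mem_range] at hr
            simp [Nat.ne_of_gt hr])]
      simp [List.filter_append]
    have h2 : ((List.range (N - key x)).map (fun r => key x + 1 + r)).flatMap (fun r => (xs ++ [x]).filter (fun y => key y == r))
        = ((List.range (N - key x)).map (fun r => key x + 1 + r)).flatMap (fun r => xs.filter (fun y => key y == r)) := by
      apply pv_flatMap_congr
      intro r hr
      simp only [List.mem_map, List.mem_range] at hr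
      obtain ⟨j, hj, hr⟩ := hr
      rw [List.filter_append]
      simp [show key x ≠ r by omega]
    rw [h1, h2]
    simp

-- with nodup keys, the items whose key is p are exactly the dict's entry for p
theorem pv_filter_key (args : List (String × String)) (h : (args.map Prod.fst).Nodup) (p : String) :
    args.filter (fun kv => kv.1 == p) =
      if PySem.Dict.contains (PySem.Dict.mk args) p then
        [(p, PySem.Dict.getD (PySem.Dict.mk args) p "")] else [] := by
  induction args with
  | nil => simp [PySem.Dict.contains]
  | cons kv rest ih =>
    obtain ⟨k, v⟩ := kv
    simp only [List.map_cons, List.nodup_cons] at h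
    by_cases hk : k = p
    · subst hk
      have hrest : rest.filter (fun kv => kv.1 == k) = [] := by
        rw [List.filter_eq_nil_iff]
        intro kv hkv
        simp only [beq_iff_eq]
        intro he
        exact h.1 (by simpa [he] using List.mem_map_of_mem (f := Prod.fst) hkv)
      simp [PySem.Dict.contains, PySem.Dict.getD, PySem.Dict.get?, hrest]
    · have hne : (k == p) = false := by simp [hk]
      simp only [List.filter_cons, hne, PySem.Dict.contains, PySem.Dict.getD, PySem.Dict.get?,
        List.any_cons, List.find?_cons] at *
      simpa [PySem.Dict.contains, PySem.Dict.getD, PySem.Dict.get?] using ih h.2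

theorem pv_take2_eq {α : Type} (p t u : List α) (h : 2 ≤ p.length) :
    (p ++ t).take 2 = (p ++ u).take 2 := by
  rcases p with _ | ⟨a, _ | ⟨b, p⟩⟩ <;> simp_all

theorem pv_contains_add (s : PySem.Set String) (k j : String) :
    (PySem.Set.add s k).contains j = (s.contains j || (j == k)) := by
  apply Bool.eq_iff_iff.mpr
  simp [PySem.Set.contains_iff, PySem.Set.mem_add, Bool.or_eq_true, beq_iff_eq]

-- A's fill loop, up to the first two items, is append-the-unseen
theorem pv_fillA_take2 (rest : List (String × String)) : ∀ (items : List (String × String)) (seen : PySem.Set String),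
    (rest.map Prod.fst).Nodup →
    (pvFillA rest items seen).take 2 =
      (items ++ rest.filter (fun kv => ¬ PySem.Set.contains seen kv.1)).take 2 := by
  induction rest with
  | nil => simp [pvFillA]
  | cons kv rest ih =>
    intro items seen h
    obtain ⟨k, v⟩ := kv
    simp only [List.map_cons, List.nodup_cons] at h
    by_cases hs : PySem.Set.contains seen k
    · simp only [pvFillA, if_pos hs, List.filter_cons]
      simp only [hs, decide_true, Bool.not_true, Bool.false_eq_true, if_false]
      exact ih items seen h.2
    · rw [Bool.not_eq_true] at hs
      simp only [pvFillA, hs, Bool.false_eq_true, if_false, List.filter_cons, decide_not,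
        Bool.not_false, decide_false, if_true]
      by_cases hlen : 2 ≤ (items ++ [(k, v)]).length
      · rw [if_pos hlen]
        simpa using pv_take2_eq (items ++ [(k, v)]) [] _ hlen
      · rw [if_neg hlen]
        rw [ih (items ++ [(k, v)]) (PySem.Set.add seen k) h.2]
        have hf : List.filter (fun kv => !PySem.Set.contains (PySem.Set.add seen k) kv.1) rest
            = List.filter (fun kv => !PySem.Set.contains seen kv.1) rest := by
          apply List.filter_congr
          intro x hx
          have hxk : x.1 ≠ k := fun he => h.1 (by simpa [he] using List.mem_map_of_mem (f := Prod.fst) hx)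
          rw [pv_contains_add, show (x.1 == k) = false from beq_eq_false_iff_ne.mpr hxk]
          simp
        simp only [decide_not, Bool.decide_eq_true] at hf ⊢
        rw [hf]
        simp

-- the rank of B, written out on the key
def pvRankSpec (s : String) : Nat :=
  if s = "path" then 0 else if s = "file" then 1 else if s = "pattern" then 2
  else if s = "query" then 3 else if s = "url" then 4 else if s = "cmd" then 5
  else if s = "command" then 6 else if s = "name" then 7 else 8

theorem pvRank_eq (kv : String × String) : pvRank kv = pvRankSpec kv.1 := by
  unfold pvRank pvRankSpec pvPriorityB PySem.List.index?
  by_cases h1 : kv.1 = "path"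
  · simp [h1, List.idxOf?, List.findIdx?_cons]
  by_cases h2 : kv.1 = "file"
  · simp [h1, h2, List.idxOf?, List.findIdx?_cons, Ne.symm h1]
  by_cases h3 : kv.1 = "pattern"
  · simp [h1, h2, h3, List.idxOf?, List.findIdx?_cons, Ne.symm h1, Ne.symm h2]
  by_cases h4 : kv.1 = "query"
  · simp [h1, h2, h3, h4, List.idxOf?, List.findIdx?_cons, Ne.symm h1, Ne.symm h2, Ne.symm h3]
  by_cases h5 : kv.1 = "url"
  · simp [h1, h2, h3, h4, h5, List.idxOf?, List.findIdx?_cons, Ne.symm h1, Ne.symm h2, Ne.symm h3, Ne.symm h4]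
  by_cases h6 : kv.1 = "cmd"
  · simp [h1, h2, h3, h4, h5, h6, List.idxOf?, List.findIdx?_cons, Ne.symm h1, Ne.symm h2, Ne.symm h3, Ne.symm h4, Ne.symm h5]
  by_cases h7 : kv.1 = "command"
  · simp [h1, h2, h3, h4, h5, h6, h7, List.idxOf?, List.findIdx?_cons, Ne.symm h1, Ne.symm h2, Ne.symm h3, Ne.symm h4, Ne.symm h5, Ne.symm h6]
  by_cases h8 : kv.1 = "name"
  · simp [h1, h2, h3, h4, h5, h6, h7, h8, List.idxOf?, List.findIdx?_cons, Ne.symm h1, Ne.symm h2, Ne.symm h3, Ne.symm h4, Ne.symm h5, Ne.symm h6, Ne.symm h7]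
  · simp [h1, h2, h3, h4, h5, h6, h7, h8]

theorem pv_filter_map_flatMap {α β : Type} (P : List α) (c : α → Bool) (f : α → β) :
    (P.filter c).map f = P.flatMap (fun k => if c k then [f k] else []) := by
  induction P with
  | nil => simp
  | cons a P ih =>
    by_cases h : c a <;> simp [List.filter_cons, h, ih]

-- A's first loop ('for k in priority: …') over a nodup priority list
theorem pv_loop1 (d : PySem.Dict String String) (P : List String) :
    ∀ (items : List (String × String)) (seen : PySem.Set String),
    P.Nodup → (∀ k ∈ P, seen.contains k = false) →
    (P.foldl (fun p k =>
        if PySem.Dict.contains d k && !(PySem.Set.contains p.2 k) then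
          (p.1 ++ [(k, PySem.Dict.getD d k "")], PySem.Set.add p.2 k)
        else p) (items, seen)).1
      = items ++ (P.filter (fun k => PySem.Dict.contains d k)).map (fun k => (k, PySem.Dict.getD d k ""))
    ∧ ∀ j, (P.foldl (fun p k =>
        if PySem.Dict.contains d k && !(PySem.Set.contains p.2 k) then
          (p.1 ++ [(k, PySem.Dict.getD d k "")], PySem.Set.add p.2 k)
        else p) (items, seen)).2.contains j
      = (seen.contains j || (decide (j ∈ P) && PySem.Dict.contains d j)) := by
  induction P with
  | nil => intro items seen _ _; simp
  | cons k P ih =>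
    intro items seen hnd hseen
    simp only [List.nodup_cons] at hnd
    have hsk : seen.contains k = false := hseen k (by simp)
    have hmem : ∀ k' ∈ k :: P, k' ∉ seen := by
      intro k' hk' hm
      have hcm : seen.contains k' = true := (PySem.Set.contains_iff seen k').mpr hm
      rw [hseen k' hk'] at hcm
      exact absurd hcm (by simp)
    by_cases hc : PySem.Dict.contains d k
    · have hstep : (if PySem.Dict.contains d k && !(PySem.Set.contains seen k) then
          (items ++ [(k, PySem.Dict.getD d k "")], PySem.Set.add seen k)
        else (items, seen)) = (items ++ [(k, PySem.Dict.getD d k "")], PySem.Set.add seen k) := by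
        simp [hc, hsk, hmem k (by simp)]
      have hseen' : ∀ k' ∈ P, (PySem.Set.add seen k).contains k' = false := by
        intro k' hk'
        rw [pv_contains_add]
        have : k' ≠ k := fun he => hnd.1 (he ▸ hk')
        simp [hseen k' (by simp [hk']), this, hmem k' (by simp [hk'])]
      obtain ⟨ihl, ihr⟩ := ih (items ++ [(k, PySem.Dict.getD d k "")]) (PySem.Set.add seen k) hnd.2 hseen'
      constructor
      · rw [List.foldl_cons, hstep, ihl]
        simp [List.filter_cons, hc]
      · intro j
        rw [List.foldl_cons, hstep, ihr j, pv_contains_add]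
        by_cases hj : j = k
        · subst hj; simp [hc, hsk]
        · rw [show (j == k) = false from beq_eq_false_iff_ne.mpr hj]
          simp [hj]
    · have hstep : (if PySem.Dict.contains d k && !(PySem.Set.contains seen k) then
          (items ++ [(k, PySem.Dict.getD d k "")], PySem.Set.add seen k)
        else (items, seen)) = (items, seen) := by
        simp [hc]
      obtain ⟨ihl, ihr⟩ := ih items seen hnd.2 (fun k' hk' => hseen k' (by simp [hk']))
      constructor
      · rw [List.foldl_cons, hstep, ihl]
        simp [List.filter_cons, hc]
      · intro j
        rw [List.foldl_cons, hstep, ihr j]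
        by_cases hj : j = k
        · subst hj; simp [hc]
        · simp [hj]

theorem pv_mem_contains (args : List (String × String)) (kv : String × String) (h : kv ∈ args) :
    PySem.Dict.contains (PySem.Dict.mk args) kv.1 = true := by
  simp only [PySem.Dict.contains, List.any_eq_true]
  exact ⟨kv, h, by simp⟩

theorem pv_filter_rank (args : List (String × String)) (r : Nat) (p : String)
    (hspec : ∀ s, (pvRankSpec s == r) = (s == p)) :
    args.filter (fun kv => pvRank kv == r) = args.filter (fun kv => kv.1 == p) :=
  List.filter_congr (fun kv _ => by rw [pvRank_eq]; exact hspec kv.1)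

theorem pv_spec0 : ∀ s, (pvRankSpec s == 0) = (s == "path") := by
  intro s; unfold pvRankSpec; split_ifs <;> simp_all
theorem pv_spec1 : ∀ s, (pvRankSpec s == 1) = (s == "file") := by
  intro s; unfold pvRankSpec; split_ifs <;> simp_all
theorem pv_spec2 : ∀ s, (pvRankSpec s == 2) = (s == "pattern") := by
  intro s; unfold pvRankSpec; split_ifs <;> simp_all
theorem pv_spec3 : ∀ s, (pvRankSpec s == 3) = (s == "query") := by
  intro s; unfold pvRankSpec; split_ifs <;> simp_all
theorem pv_spec4 : ∀ s, (pvRankSpec s == 4) = (s == "url") := by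
  intro s; unfold pvRankSpec; split_ifs <;> simp_all
theorem pv_spec5 : ∀ s, (pvRankSpec s == 5) = (s == "cmd") := by
  intro s; unfold pvRankSpec; split_ifs <;> simp_all
theorem pv_spec6 : ∀ s, (pvRankSpec s == 6) = (s == "command") := by
  intro s; unfold pvRankSpec; split_ifs <;> simp_all
theorem pv_spec7 : ∀ s, (pvRankSpec s == 7) = (s == "name") := by
  intro s; unfold pvRankSpec; split_ifs <;> simp_all
theorem pv_rank8 (s : String) : (pvRankSpec s == 8) = !decide (s ∈ pvPriorityA) := by
  unfold pvRankSpec pvPriorityA; split_ifs <;> simp_all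

set_option maxHeartbeats 1000000 in
theorem preview_args_main (args : List (String × String)) (h : (args.map Prod.fst).Nodup) :
    preview_args_py args = preview_args_py_alt args := by
  unfold preview_args_py preview_args_py_alt
  by_cases hnil : args = []
  · simp [hnil]
  simp only [if_neg hnil]
  have hrender : pvRenderA = pvRenderB := rfl
  rw [hrender]
  congr 2
  -- the two selected-items lists agree up to position 2
  obtain ⟨hl, hr⟩ := pv_loop1 (PySem.Dict.mk args) pvPriorityA [] PySem.Set.empty (by decide)
    (fun k _ => rfl)
  rw [pv_fillA_take2 args _ _ h, hl]
  -- the B side: sorted = (priority blocks) ++ (rank-8 block)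
  have hbound : ∀ x ∈ args, pvRank x ≤ 8 := by
    intro x _
    rw [pvRank_eq]
    unfold pvRankSpec
    split_ifs <;> omega
  rw [pv_sorted_flatMap args pvRank 8 hbound]
  rw [show (8 : Nat) + 1 = 8 + 1 from rfl, List.range_succ, List.flatMap_append]
  -- the last (non-priority) blocks coincide
  have hlast : args.filter (fun kv => ¬ PySem.Set.contains
        (pvPriorityA.foldl (fun p k =>
          if PySem.Dict.contains (PySem.Dict.mk args) k && !(PySem.Set.contains p.2 k) then
            (p.1 ++ [(k, PySem.Dict.getD (PySem.Dict.mk args) k "")], PySem.Set.add p.2 k)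
          else p) ([], PySem.Set.empty)).2 kv.1)
      = args.filter (fun kv => pvRank kv == 8) := by
    apply List.filter_congr
    intro kv hkv
    rw [hr kv.1, pv_mem_contains args kv hkv, pvRank_eq, pv_rank8]
    simp
  rw [hlast]
  congr 1
  rw [pv_filter_map_flatMap]
  rw [show List.range 8 = [0, 1, 2, 3, 4, 5, 6, 7] from by decide]
  simp only [List.flatMap_cons, List.flatMap_nil, List.append_nil, pvPriorityA]
  rw [pv_filter_rank args 0 "path" pv_spec0, pv_filter_rank args 1 "file" pv_spec1,
    pv_filter_rank args 2 "pattern" pv_spec2, pv_filter_rank args 3 "query" pv_spec3,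
    pv_filter_rank args 4 "url" pv_spec4, pv_filter_rank args 5 "cmd" pv_spec5,
    pv_filter_rank args 6 "command" pv_spec6, pv_filter_rank args 7 "name" pv_spec7]
  rw [pv_filter_key args h "path", pv_filter_key args h "file", pv_filter_key args h "pattern",
    pv_filter_key args h "query", pv_filter_key args h "url", pv_filter_key args h "cmd",
    pv_filter_key args h "command", pv_filter_key args h "name"]
  simp

-- ===== VERDICT (by name: the statement is the Claim_ definition above) =====
theorem preview_args_py_spec : Claim_equal_preview_args_py := by
  intro args _ hpre
  exact preview_args_main args hpre
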